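-- pv_equiv track=rewrite | github.com/filwaitman/playground | Codility/python/frog_river_one.py | solution
-- ===== SOURCE A (Python) =====
-- def solution(X, A):
--     expected = set(range(1, X+1))
--
--     path_created = set()
--     for seconds_elapsed, item in enumerate(A):
--         if item > X:
--             continue
--
--         path_created.add(item)
--         if path_created == expected:
--             return seconds_elapsed
--
--     return -1
-- ===== SOURCE B (Python) =====
-- def solution(X, A):
--     first = {}
--     for i, v in reversed(list(enumerate(A))):
--         if 1 <= v <= X:
--             first[v] = i
--     if len(first) == X:
--         return max(first.values(), default=-1)
--     return -1
-- ===== Notes on version B (the rewrite author's own statement) =====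
-- stated objective: alternative
-- what changed: B abandons A's step-by-step simulation with a whole-set equality test per leaf: it builds a first-occurrence index for the in-range positions in one backward pass over enumerate(A) and returns the maximum of those first-occurrence indices when all X positions are present, -1 otherwise.
-- intended difference: On inputs with X>=1 where some leaf value <= 0 falls at or before the first time positions 1..X are all covered, A returns -1 (the nonpositive value is added to path_created so it can never equal expected) while B returns that first coverage time, which is the intended answer since a leaf outside the river cannot prevent the frog from crossing. — e.g. on solution(1, [0, 1]): A returns -1, B returns 1
import Mathlib
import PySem

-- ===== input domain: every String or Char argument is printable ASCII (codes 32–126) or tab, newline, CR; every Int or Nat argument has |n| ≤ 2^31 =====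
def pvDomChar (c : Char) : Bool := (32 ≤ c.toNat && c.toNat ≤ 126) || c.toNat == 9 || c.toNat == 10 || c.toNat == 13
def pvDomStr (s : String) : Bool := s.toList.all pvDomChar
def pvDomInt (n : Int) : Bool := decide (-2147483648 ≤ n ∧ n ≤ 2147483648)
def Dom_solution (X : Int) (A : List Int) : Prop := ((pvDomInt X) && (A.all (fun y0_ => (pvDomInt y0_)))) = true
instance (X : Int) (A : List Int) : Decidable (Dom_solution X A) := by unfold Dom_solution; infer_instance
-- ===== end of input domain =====

-- B replaces A's step-by-step simulation (whole-set equality test per leaf) by a different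
-- algorithm: a first-occurrence index built in one backward pass plus a max over it; B ignores
-- leaves at nonpositive positions instead of letting them poison A's comparison (see D_solution).

-- ===== PORT A =====
-- loop of A: for seconds_elapsed, item in enumerate(A), carrying path_created
def solGoA (X : Int) (expected : PySem.Set Int) (sec : Int) (path : PySem.Set Int) : List Int → Int
  | [] => -1
  | item :: rest =>
    if item > X then
      solGoA X expected (sec + 1) path rest
    else
      if PySem.Set.equal (PySem.Set.add path item) expected then sec
      else solGoA X expected (sec + 1) (PySem.Set.add path item) rest

-- expected = set(range(1, X+1)): the range is duplicate-free, so the set is the range list itself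
-- (PySem.Set.ofList_eq_self_of_nodup, PySem.List.nodup_pyRange_one); materialized directly so evaluation stays linear
def solution (X : Int) (A : List Int) : Int :=
  solGoA X (PySem.List.pyRange 1 (X + 1) 1) 0 PySem.Set.empty A

-- ===== PORT B =====
-- first = {}; for i, v in reversed(list(enumerate(A))): if 1 <= v <= X: first[v] = i
-- return max(first.values(), default=-1) if len(first) == X else -1
def solution_alt (X : Int) (A : List Int) : Int :=
  let first := ((PySem.List.enumerate A).reverse).foldl
      (fun (d : PySem.Dict Int Int) (p : Int × Int) =>
        if 1 ≤ p.2 ∧ p.2 ≤ X then d.insert p.2 p.1 else d) PySem.Dict.empty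
  if (PySem.Dict.size first : Int) = X then
    (PySem.List.max? (PySem.Dict.values first) (fun y => y)).getD (-1)
  else -1

-- ===== PRECONDITION & SPEC =====
-- On inputs with X ≥ 1 where some value ≤ 0 occurs at or before the first index at which all of
-- 1..X are covered, A returns -1 (the nonpositive value poisons its set comparison forever) while
-- B returns that first coverage index, the intended answer: a leaf outside 1..X cannot block the frog.
-- "all of 1..X are covered by the first t+1 leaves" is stated by counting the distinct
-- in-range values of that prefix (so the condition is cheap to decide even for huge X)
def D_solution (X : Int) (A : List Int) : Prop :=
  1 ≤ X ∧ ∃ t ∈ List.range A.length,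
    ((((A.take (t + 1)).filter (fun x => decide (1 ≤ x ∧ x ≤ X))).dedup.length : Int) = X) ∧
    (∀ t' ∈ List.range t,
      ¬ ((((A.take (t' + 1)).filter (fun x => decide (1 ≤ x ∧ x ≤ X))).dedup.length : Int) = X)) ∧
    (∃ x ∈ A.take (t + 1), x ≤ 0)

instance (X : Int) (A : List Int) : Decidable (D_solution X A) := by unfold D_solution; infer_instance

def Spec_solution (X : Int) (A : List Int) (out : Int) : Prop := ¬ D_solution X A → out = solution_alt X A
instance (X : Int) (A : List Int) (out : Int) : Decidable (Spec_solution X A out) := by unfold Spec_solution; infer_instance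

def pvDiffWitness_solution : Int × List Int := (1, [0, 1])
def pvDiffWitnessOut_solution : Int × Int := (-1, 1)

-- ===== CLAIM (what is proved, stated in full; the proofs are below) =====
def Claim_unchanged_solution : Prop := ∀ (X : Int) (A : List Int), Dom_solution X A → Spec_solution X A (solution X A)
def Claim_exact_solution : Prop := ∀ (X : Int) (A : List Int), Dom_solution X A → D_solution X A → solution X A ≠ solution_alt X A
def Claim_changed_solution : Prop := Dom_solution (pvDiffWitness_solution.1) (pvDiffWitness_solution.2) ∧ D_solution (pvDiffWitness_solution.1) (pvDiffWitness_solution.2) ∧ solution (pvDiffWitness_solution.1) (pvDiffWitness_solution.2) = pvDiffWitnessOut_solution.1 ∧ solution_alt (pvDiffWitness_solution.1) (pvDiffWitness_solution.2) = pvDiffWitnessOut_solution.2 ∧ pvDiffWitnessOut_solution.1 ≠ pvDiffWitnessOut_solution.2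

-- ===== LEMMAS AND PROOFS =====

-- the positions 1..X, as A's `expected` list
def Rng (X : Int) : List Int := PySem.List.pyRange 1 (X + 1) 1

-- every position 1..X is either already in s or occurs in l
def Covers (X : Int) (s l : List Int) : Prop := ∀ v ∈ Rng X, v ∈ s ∨ v ∈ l

-- every position 1..X is in s
def Full (X : Int) (s : List Int) : Prop := ∀ v ∈ Rng X, v ∈ s

def Clean (p : List Int) : Prop := ∀ v ∈ p, (1:Int) ≤ v

-- ghost forward loop used only by the proofs: distinct-in-range counter; A is synchronized with
-- it (mainEq) and B's first-occurrence maximum is shown to compute the same answer (solGoB_min)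
def solGoB (X : Int) (t : Int) (seen : PySem.Set Int) (remaining : Int) : List Int → Int
  | [] => -1
  | item :: rest =>
    if 1 ≤ item ∧ item ≤ X ∧ item ∉ seen then
      if remaining - 1 = 0 then t
      else solGoB X (t + 1) (PySem.Set.add seen item) (remaining - 1) rest
    else solGoB X (t + 1) seen remaining rest

-- "clean prefix up to the first coverage point": if coverage completes somewhere in the list,
-- every element strictly before the completion point is ≥ 1
def CPF (X : Int) : List Int → PySem.Set Int → Prop
  | [], _ => True
  | item :: rest, s =>
    Covers X s (item :: rest) →
      Full X (PySem.Set.add s item) ∨ (1 ≤ item ∧ CPF X rest (PySem.Set.add s item))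

lemma mem_Rng (X v : Int) : v ∈ Rng X ↔ 1 ≤ v ∧ v ≤ X := by
  rw [Rng, PySem.List.mem_pyRange_one]; omega

lemma covers_cons (X : Int) (s : PySem.Set Int) (a : Int) (l : List Int) :
    Covers X s (a :: l) ↔ Covers X (PySem.Set.add s a) l := by
  simp only [Covers, List.mem_cons, PySem.Set.mem_add]
  constructor <;> intro h v hv <;> rcases h v hv with h' | h' <;> tauto

lemma covers_weaken (X : Int) (s : List Int) (a : Int) (l : List Int) :
    Covers X s l → Covers X s (a :: l) := by
  intro h v hv; rcases h v hv with h' | h' <;> simp [h']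

lemma covers_empty_iff (X : Int) (l : List Int) :
    Covers X PySem.Set.empty l ↔ ∀ v ∈ Rng X, v ∈ l := by
  simp [Covers, PySem.Set.empty]

lemma exists_missing (X : Int) (s : PySem.Set Int) (hnd : s.Nodup)
    (hsub : ∀ v ∈ s, 1 ≤ v ∧ v ≤ X) (hlen : (s.length : Int) < X) :
    ∃ v0, 1 ≤ v0 ∧ v0 ≤ X ∧ v0 ∉ s := by
  by_contra h
  push_neg at h
  have hsub2 : Rng X ⊆ s := by
    intro v hv
    rw [mem_Rng] at hv
    exact h v hv.1 hv.2
  have := (List.subperm_of_subset (PySem.List.nodup_pyRange_one (a := 1) (b := X + 1)) hsub2).length_le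
  simp only [Rng, PySem.List.length_pyRange_one] at this
  omega

lemma full_of_len (X : Int) (s : PySem.Set Int) (hnd : s.Nodup)
    (hsub : ∀ v ∈ s, 1 ≤ v ∧ v ≤ X) (hlen : (s.length : Int) = X) : Full X s := by
  have hsub2 : s ⊆ Rng X := by
    intro v hv; rw [mem_Rng]; exact hsub v hv
  have hsp := List.subperm_of_subset hnd hsub2
  have hlr : (Rng X).length ≤ s.length := by
    rw [Rng, PySem.List.length_pyRange_one]; omega
  have hperm : s.Perm (Rng X) := hsp.perm_of_length_le hlr
  intro v hv
  exact hperm.mem_iff.mpr hv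

-- the distinct-in-range count of l equals X iff l covers all of 1..X
lemma cnt_iff_cover (X : Int) (hX : 1 ≤ X) (l : List Int) :
    (((l.filter (fun x => decide (1 ≤ x ∧ x ≤ X))).dedup.length : Int) = X) ↔
      ∀ v ∈ Rng X, v ∈ l := by
  have hnodS : (l.filter (fun x => decide (1 ≤ x ∧ x ≤ X))).dedup.Nodup := List.nodup_dedup _
  have hSsub : (l.filter (fun x => decide (1 ≤ x ∧ x ≤ X))).dedup ⊆ Rng X := by
    intro v hv
    rw [List.mem_dedup] at hv
    have := List.of_mem_filter hv
    simp only [decide_eq_true_eq] at this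
    exact (mem_Rng X v).mpr this
  have hsp := List.subperm_of_subset hnodS hSsub
  have hlenR : (Rng X).length = X.toNat := by
    simp only [Rng, PySem.List.length_pyRange_one]; congr 1; omega
  constructor
  · intro hcnt v hv
    have hperm := hsp.perm_of_length_le (by omega)
    have hvS := hperm.mem_iff.mpr hv
    rw [List.mem_dedup] at hvS
    exact List.mem_of_mem_filter hvS
  · intro hcov
    have hRsub : Rng X ⊆ (l.filter (fun x => decide (1 ≤ x ∧ x ≤ X))).dedup := by
      intro v hv
      have hb := (mem_Rng X v).mp hv
      rw [List.mem_dedup, List.mem_filter]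
      exact ⟨hcov v hv, by simp [hb.1, hb.2]⟩
    have hsp2 := List.subperm_of_subset (by rw [Rng]; exact PySem.List.nodup_pyRange_one _ _) hRsub
    have h1 := hsp.length_le
    have h2 := hsp2.length_le
    omega

lemma length_add_not_mem (s : PySem.Set Int) (a : Int) (h : a ∉ s) :
    (PySem.Set.add s a).length = s.length + 1 := by
  rw [PySem.Set.add_of_not_mem h, List.length_append]
  rfl

-- extraction of a minimal witness (no decidability needed: Nat.sInf)
lemma exists_minimal {P : Nat → Prop} (h : ∃ k, P k) :
    ∃ k, P k ∧ ∀ j, j < k → ¬ P j := by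
  refine ⟨sInf {k | P k}, Nat.sInf_mem h, ?_⟩
  intro j hj hPj
  have hle : sInf {k | P k} ≤ j := Nat.sInf_le hPj
  omega

lemma sInf_succ_eq {P Q : Nat → Prop} (h0 : ¬ P 0) (hiff : ∀ k, P (k + 1) ↔ Q k)
    (hne : ∃ k, Q k) : sInf {k | P k} = sInf {k | Q k} + 1 := by
  obtain ⟨m, hm⟩ := hne
  have hmQ : sInf {k | Q k} ∈ {k | Q k} := Nat.sInf_mem ⟨m, hm⟩
  have hP : (sInf {k | Q k} + 1) ∈ {k | P k} := (hiff _).mpr hmQ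
  have hle : sInf {k | P k} ≤ sInf {k | Q k} + 1 := Nat.sInf_le hP
  have hmem : sInf {k | P k} ∈ {k | P k} := Nat.sInf_mem ⟨_, hP⟩
  rcases n0 : sInf {k | P k} with _ | n
  · rw [n0] at hmem; exact absurd hmem h0
  · rw [n0] at hmem
    have hQn : n ∈ {k | Q k} := (hiff n).mp hmem
    have := Nat.sInf_le hQn
    omega

lemma mem_take_of_getElem (A : List Int) (k n : Nat) (hk : k < A.length) (hkn : k < n) :
    A[k] ∈ A.take n := by
  have h2 : k < (A.take n).length := by simp [List.length_take]; omega
  have h3 : (A.take n)[k] = A[k] := List.getElem_take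
  rw [← h3]
  exact List.getElem_mem h2

lemma exists_of_mem_take (A : List Int) (n : Nat) (v : Int) (h : v ∈ A.take n) :
    ∃ k, k < n ∧ ∃ hk : k < A.length, A[k] = v := by
  obtain ⟨k, hk, hkv⟩ := List.mem_iff_getElem.mp h
  have hlen : k < n ∧ k < A.length := by
    simp only [List.length_take] at hk; omega
  refine ⟨k, hlen.1, hlen.2, ?_⟩
  rw [← hkv]
  exact (List.getElem_take).symm

lemma cpf_intro (X : Int) : ∀ (l : List Int) (s : PySem.Set Int),
    (∀ k : Nat, k < l.length → Covers X s (l.take (k + 1)) →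
      (∀ k' : Nat, k' < k → ¬ Covers X s (l.take (k' + 1))) →
      ∀ x ∈ l.take (k + 1), (1:Int) ≤ x) →
    CPF X l s := by
  intro l
  induction l with
  | nil => intro s _; trivial
  | cons a l ih =>
    intro s h
    intro hcov
    by_cases hfull : Full X (PySem.Set.add s a)
    · exact Or.inl hfull
    · right
      have hex : ∃ k, Covers X s ((a :: l).take (k + 1)) := by
        refine ⟨l.length, ?_⟩
        have : (a :: l).take (l.length + 1) = a :: l := by
          apply List.take_of_length_le; simp
        rw [this]; exact hcov
      obtain ⟨k0, hk0, hk0min⟩ := exists_minimal hex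
      have hk0len : k0 < (a :: l).length := by
        by_contra hge
        push_neg at hge
        simp only [List.length_cons] at hge
        have hk0pos : 0 < k0 := by
          rcases Nat.eq_zero_or_pos k0 with h0 | h0
          · subst h0; simp at hge
          · exact h0
        have : Covers X s ((a :: l).take ((k0 - 1) + 1)) := by
          have h1 : (a :: l).take ((k0 - 1) + 1) = a :: l := by
            apply List.take_of_length_le; simp; omega
          rw [h1]; exact hcov
        exact hk0min (k0 - 1) (by omega) this
      have hclean : ∀ x ∈ (a :: l).take (k0 + 1), (1:Int) ≤ x :=
        h k0 hk0len hk0 hk0min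
      have ha1 : (1:Int) ≤ a := by
        apply hclean
        simp [List.take_succ_cons]
      refine ⟨ha1, ih (PySem.Set.add s a) ?_⟩
      intro k hk hkcov hkmin
      have hcov' : Covers X s ((a :: l).take (k + 2)) := by
        rw [List.take_succ_cons, covers_cons]
        exact hkcov
      have hmin' : ∀ k' : Nat, k' < k + 1 → ¬ Covers X s ((a :: l).take (k' + 1)) := by
        intro k' hk' hc
        rcases Nat.eq_zero_or_pos k' with h0 | h0
        · subst h0
          simp only [List.take_succ_cons, List.take_zero] at hc
          apply hfull
          intro v hv
          rcases hc v hv with h' | h'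
          · exact (PySem.Set.mem_add _ _ _).mpr (Or.inl h')
          · simp at h'; exact (PySem.Set.mem_add _ _ _).mpr (Or.inr h')
        · have := hkmin (k' - 1) (by omega)
          apply this
          have heq : (a :: l).take (k' + 1) = a :: l.take k' := List.take_succ_cons
          rw [heq, covers_cons] at hc
          have : l.take ((k' - 1) + 1) = l.take k' := by congr 1; omega
          rw [this]
          exact hc
      have := h (k + 1) (by simpa using Nat.succ_lt_succ hk) hcov' hmin'
      intro x hx
      apply this
      rw [List.take_succ_cons]
      exact List.mem_cons_of_mem _ hx

-- congruence: these predicates only depend on the 1..X members of s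
lemma full_congr (X : Int) (s s' : List Int)
    (h : ∀ v, 1 ≤ v → v ≤ X → (v ∈ s ↔ v ∈ s')) : Full X s → Full X s' := by
  intro hf v hv
  have := mem_Rng X v |>.mp hv
  exact (h v this.1 this.2).mp (hf v hv)

lemma covers_congr (X : Int) (s s' l : List Int)
    (h : ∀ v, 1 ≤ v → v ≤ X → (v ∈ s ↔ v ∈ s')) : Covers X s l → Covers X s' l := by
  intro hf v hv
  have hm := mem_Rng X v |>.mp hv
  rcases hf v hv with h' | h'
  · exact Or.inl ((h v hm.1 hm.2).mp h')
  · exact Or.inr h'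

lemma cpf_congr (X : Int) : ∀ (l : List Int) (s s' : PySem.Set Int),
    (∀ v, 1 ≤ v → v ≤ X → (v ∈ s ↔ v ∈ s')) → CPF X l s → CPF X l s' := by
  intro l
  induction l with
  | nil => intro s s' _ _; trivial
  | cons a l ih =>
    intro s s' h hc hcov
    have h' : ∀ v, 1 ≤ v → v ≤ X → (v ∈ PySem.Set.add s a ↔ v ∈ PySem.Set.add s' a) := by
      intro v h1 h2
      simp only [PySem.Set.mem_add]
      rw [h v h1 h2]
    rcases hc (covers_congr X s' s _ (fun v a b => (h v a b).symm) hcov) with hf | ⟨ha, hcpf⟩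
    · exact Or.inl (full_congr X _ _ h' hf)
    · exact Or.inr ⟨ha, ih _ _ h' hcpf⟩

-- the ghost loop never fires its branch for X ≤ 0
lemma solGoB_nonpos (X : Int) (hX : X ≤ 0) : ∀ (l : List Int) (t : Int) (s : PySem.Set Int) (r : Int),
    solGoB X t s r l = -1 := by
  intro l
  induction l with
  | nil => intro t s r; rfl
  | cons a l ih =>
    intro t s r
    rw [solGoB, if_neg (by rintro ⟨h1, h2, _⟩; omega)]
    exact ih _ _ _

-- A can never equal an empty expected set (path' always contains the freshly added item)
lemma solGoA_empty (X : Int) : ∀ (l : List Int) (sec : Int) (p : PySem.Set Int),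
    solGoA X PySem.Set.empty sec p l = -1 := by
  intro l
  induction l with
  | nil => intro sec p; rfl
  | cons a l ih =>
    intro sec p
    rw [solGoA]
    split
    · exact ih _ _
    · rw [if_neg, ]
      · exact ih _ _
      · intro h
        have := (PySem.Set.equal_iff _ _).mp h a
        have ha : a ∈ PySem.Set.add p a := (PySem.Set.mem_add _ _ _).mpr (Or.inr rfl)
        have := this.mp ha
        simp [PySem.Set.empty] at this

-- main synchronized induction between A's loop and the ghost counter loop, X ≥ 1
lemma mainEq (X : Int) (hX : 1 ≤ X) :
    ∀ (l : List Int) (sec : Int) (path seen : PySem.Set Int) (remaining : Int),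
      path.Nodup → seen.Nodup →
      (∀ v ∈ seen, 1 ≤ v ∧ v ≤ X) →
      (∀ v ∈ path, v ≤ X) →
      (∀ v : Int, 1 ≤ v → v ≤ X → (v ∈ path ↔ v ∈ seen)) →
      remaining = X - seen.length →
      1 ≤ remaining →
      ((Clean path ∧ CPF X l seen) ∨ ¬ Covers X seen l) →
      solGoA X (Rng X) sec path l = solGoB X sec seen remaining l := by
  intro l
  induction l with
  | nil => intro sec path seen remaining _ _ _ _ _ _ _ _; rfl
  | cons item rest ih =>
    intro sec path seen remaining hpn hsn hseen hple hiff hrem hrem1 hH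
    have hlen : (seen.length : Int) < X := by omega
    obtain ⟨v0, hv01, hv0X, hv0n⟩ := exists_missing X seen hsn hseen hlen
    have notFull : ¬ Full X seen := fun hf => hv0n (hf v0 ((mem_Rng X v0).mpr ⟨hv01, hv0X⟩))
    by_cases hgt : item > X
    · rw [solGoA, if_pos hgt, solGoB, if_neg (by rintro ⟨_, h2, _⟩; omega)]
      apply ih (sec + 1) path seen remaining hpn hsn hseen hple hiff hrem hrem1
      rcases hH with ⟨hcl, hcpf⟩ | hnc
      · by_cases hc : Covers X seen rest
        · rcases hcpf (covers_weaken X seen item rest hc) with hfull | ⟨_, hcpf'⟩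
          · refine absurd (full_congr X _ _ (fun v hv1 hv2 => ?_) hfull) notFull
            rw [PySem.Set.mem_add]
            constructor
            · rintro (h | rfl)
              · exact h
              · omega
            · exact Or.inl
          · refine Or.inl ⟨hcl, cpf_congr X rest _ _ (fun v hv1 hv2 => ?_) hcpf'⟩
            rw [PySem.Set.mem_add]
            constructor
            · rintro (h | rfl)
              · exact h
              · omega
            · exact Or.inl
        · exact Or.inr hc
      · exact Or.inr (fun hc => hnc (covers_weaken X seen item rest hc))
    · have hle : item ≤ X := by omega
      by_cases h1 : (1:Int) ≤ item
      · by_cases hmem : item ∈ seen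
        · -- the ghost loop skips; A re-adds a member, path unchanged, comparison still fails
          have hmp : item ∈ path := (hiff item h1 hle).mpr hmem
          have hadd : PySem.Set.add path item = path := PySem.Set.add_of_mem hmp
          have hne : ¬ (PySem.Set.equal (PySem.Set.add path item) (Rng X) = true) := by
            rw [hadd]
            intro h
            have h' := (PySem.Set.equal_iff _ _).mp h v0
            exact hv0n ((hiff v0 hv01 hv0X).mp (h'.mpr ((mem_Rng X v0).mpr ⟨hv01, hv0X⟩)))
          rw [solGoA, if_neg hgt, if_neg hne, hadd, solGoB,
            if_neg (by rintro ⟨_, _, h3⟩; exact h3 hmem)]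
          apply ih (sec + 1) path seen remaining hpn hsn hseen hple hiff hrem hrem1
          rcases hH with ⟨hcl, hcpf⟩ | hnc
          · by_cases hc : Covers X seen rest
            · rcases hcpf (covers_weaken X seen item rest hc) with hfull | ⟨_, hcpf'⟩
              · refine absurd (full_congr X _ _ (fun v hv1 hv2 => ?_) hfull) notFull
                rw [PySem.Set.mem_add]
                constructor
                · rintro (h | rfl)
                  · exact h
                  · exact hmem
                · exact Or.inl
              · refine Or.inl ⟨hcl, cpf_congr X rest _ _ (fun v hv1 hv2 => ?_) hcpf'⟩
                rw [PySem.Set.mem_add]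
                constructor
                · rintro (h | rfl)
                  · exact h
                  · exact hmem
                · exact Or.inl
            · exact Or.inr hc
          · exact Or.inr (fun hc => hnc (covers_weaken X seen item rest hc))
        · have hmpn : item ∉ path := fun h => hmem ((hiff item h1 hle).mp h)
          have hlenadd : (PySem.Set.add seen item).length = seen.length + 1 :=
            length_add_not_mem seen item hmem
          have hseen' : ∀ v ∈ PySem.Set.add seen item, 1 ≤ v ∧ v ≤ X := by
            intro v hv
            rcases (PySem.Set.mem_add _ _ _).mp hv with h | rfl
            · exact hseen v h
            · exact ⟨h1, hle⟩
          by_cases hr0 : remaining - 1 = 0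
          · -- coverage completes here: both return the current counter
            have hfull' : Full X (PySem.Set.add seen item) :=
              full_of_len X _ (PySem.Set.nodup_add _ _ hsn) hseen'
                (by rw [hlenadd]; push_cast; omega)
            have hcov0 : Covers X seen (item :: rest) := by
              intro v hv
              rcases (PySem.Set.mem_add _ _ _).mp (hfull' v hv) with h | rfl
              · exact Or.inl h
              · exact Or.inr (List.mem_cons_self)
            rcases hH with ⟨hcl, _⟩ | hnc
            · have heq : PySem.Set.equal (PySem.Set.add path item) (Rng X) = true := by
                rw [PySem.Set.equal_iff]
                intro x
                constructor
                · intro hx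
                  rcases (PySem.Set.mem_add _ _ _).mp hx with h | rfl
                  · exact (mem_Rng X x).mpr ⟨hcl x h, hple x h⟩
                  · exact (mem_Rng X x).mpr ⟨h1, hle⟩
                · intro hx
                  rcases (PySem.Set.mem_add _ _ _).mp (hfull' x hx) with h | rfl
                  · have hb := (mem_Rng X x).mp hx
                    exact (PySem.Set.mem_add _ _ _).mpr (Or.inl ((hiff x hb.1 hb.2).mpr h))
                  · exact (PySem.Set.mem_add _ _ _).mpr (Or.inr rfl)
              rw [solGoA, if_neg hgt, if_pos heq, solGoB, if_pos ⟨h1, hle, hmem⟩, if_pos hr0]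
            · exact absurd hcov0 hnc
          · -- a position is still missing after this step: A's comparison fails, both recurse
            have hlenint : ((PySem.Set.add seen item).length : Int) < X := by
              rw [hlenadd]; push_cast; omega
            obtain ⟨w, hw1, hwX, hwn⟩ :=
              exists_missing X _ (PySem.Set.nodup_add _ _ hsn) hseen' hlenint
            have hne : ¬ (PySem.Set.equal (PySem.Set.add path item) (Rng X) = true) := by
              intro h
              have h' := (PySem.Set.equal_iff _ _).mp h w
              have hwp := h'.mpr ((mem_Rng X w).mpr ⟨hw1, hwX⟩)
              rcases (PySem.Set.mem_add _ _ _).mp hwp with hh | rfl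
              · exact hwn ((PySem.Set.mem_add _ _ _).mpr (Or.inl ((hiff w hw1 hwX).mp hh)))
              · exact hwn ((PySem.Set.mem_add _ _ _).mpr (Or.inr rfl))
            rw [solGoA, if_neg hgt, if_neg hne, solGoB, if_pos ⟨h1, hle, hmem⟩, if_neg hr0]
            apply ih (sec + 1) (PySem.Set.add path item) (PySem.Set.add seen item) (remaining - 1)
              (PySem.Set.nodup_add _ _ hpn) (PySem.Set.nodup_add _ _ hsn) hseen'
            · intro v hv
              rcases (PySem.Set.mem_add _ _ _).mp hv with h | rfl
              · exact hple v h
              · exact hle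
            · intro v hv1 hv2
              simp only [PySem.Set.mem_add]
              exact or_congr_left (hiff v hv1 hv2)
            · rw [hlenadd]; push_cast; omega
            · omega
            · rcases hH with ⟨hcl, hcpf⟩ | hnc
              · by_cases hc : Covers X (PySem.Set.add seen item) rest
                · rcases hcpf ((covers_cons X seen item rest).mpr hc) with hfull | ⟨_, hcpf'⟩
                  · exact absurd (hfull w ((mem_Rng X w).mpr ⟨hw1, hwX⟩)) hwn
                  · refine Or.inl ⟨?_, hcpf'⟩
                    intro v hv
                    rcases (PySem.Set.mem_add _ _ _).mp hv with h | rfl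
                    · exact hcl v h
                    · exact h1
                · exact Or.inr hc
              · exact Or.inr (fun hc => hnc ((covers_cons X seen item rest).mpr hc))
      · -- item ≤ 0: A poisons its set, the ghost loop skips; coverage can never be reported by A
        have h0 : item ≤ 0 := by omega
        have hne : ¬ (PySem.Set.equal (PySem.Set.add path item) (Rng X) = true) := by
          intro h
          have h' := (PySem.Set.equal_iff _ _).mp h item
          have := (mem_Rng X item).mp (h'.mp ((PySem.Set.mem_add _ _ _).mpr (Or.inr rfl)))
          omega
        rw [solGoA, if_neg hgt, if_neg hne, solGoB, if_neg (by rintro ⟨ha, _, _⟩; omega)]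
        apply ih (sec + 1) (PySem.Set.add path item) seen remaining
          (PySem.Set.nodup_add _ _ hpn) hsn hseen
        · intro v hv
          rcases (PySem.Set.mem_add _ _ _).mp hv with h | rfl
          · exact hple v h
          · omega
        · intro v hv1 hv2
          simp only [PySem.Set.mem_add]
          constructor
          · rintro (h | rfl)
            · exact (hiff v hv1 hv2).mp h
            · omega
          · exact fun h => Or.inl ((hiff v hv1 hv2).mpr h)
        · exact hrem
        · exact hrem1
        · refine Or.inr (fun hc => ?_)
          rcases hH with ⟨hcl, hcpf⟩ | hnc
          · rcases hcpf (covers_weaken X seen item rest hc) with hfull | ⟨ha, _⟩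
            · refine notFull (full_congr X _ _ (fun v hv1 hv2 => ?_) hfull)
              rw [PySem.Set.mem_add]
              constructor
              · rintro (h | rfl)
                · exact h
                · omega
              · exact Or.inl
            · omega
          · exact hnc (covers_weaken X seen item rest hc)

-- ----- the ghost loop's answer in closed form -----

-- no coverage: the ghost loop returns -1
lemma solGoB_none (X : Int) : ∀ (l : List Int) (t : Int) (s : PySem.Set Int) (r : Int),
    s.Nodup → (∀ v ∈ s, 1 ≤ v ∧ v ≤ X) → r = X - s.length →
    ¬ Covers X s l → solGoB X t s r l = -1 := by
  intro l
  induction l with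
  | nil => intro t s r _ _ _ _; rfl
  | cons item rest ih =>
    intro t s r hsn hsb hr hnc
    rw [solGoB]
    by_cases hb : 1 ≤ item ∧ item ≤ X ∧ item ∉ s
    · rw [if_pos hb]
      by_cases hr0 : r - 1 = 0
      · exfalso
        apply hnc
        have hfull : Full X (PySem.Set.add s item) := by
          apply full_of_len X _ (PySem.Set.nodup_add _ _ hsn)
          · intro v hv
            rcases (PySem.Set.mem_add _ _ _).mp hv with h | rfl
            · exact hsb v h
            · exact ⟨hb.1, hb.2.1⟩
          · rw [length_add_not_mem s item hb.2.2]; push_cast; omega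
        intro v hv
        rcases (PySem.Set.mem_add _ _ _).mp (hfull v hv) with h | rfl
        · exact Or.inl h
        · exact Or.inr List.mem_cons_self
      · rw [if_neg hr0]
        apply ih (t + 1) _ _ (PySem.Set.nodup_add _ _ hsn)
        · intro v hv
          rcases (PySem.Set.mem_add _ _ _).mp hv with h | rfl
          · exact hsb v h
          · exact ⟨hb.1, hb.2.1⟩
        · rw [length_add_not_mem s item hb.2.2]; push_cast; omega
        · intro hc
          exact hnc ((covers_cons X s item rest).mpr hc)
    · rw [if_neg hb]
      apply ih (t + 1) _ _ hsn hsb hr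
      intro hc
      exact hnc (covers_weaken X s item rest hc)

-- coverage: the ghost loop returns the first index at which the prefix covers 1..X
lemma solGoB_min (X : Int) (hX : 1 ≤ X) : ∀ (l : List Int) (t : Int) (s : PySem.Set Int) (r : Int),
    s.Nodup → (∀ v ∈ s, 1 ≤ v ∧ v ≤ X) → r = X - s.length → 1 ≤ r →
    Covers X s l →
    solGoB X t s r l = t + ((sInf {k : Nat | Covers X s (l.take (k + 1))} : Nat) : Int) := by
  intro l
  induction l with
  | nil =>
    intro t s r hsn hsb hr hr1 hcov
    exfalso
    obtain ⟨v0, hv01, hv0X, hv0n⟩ := exists_missing X s hsn hsb (by omega)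
    rcases hcov v0 ((mem_Rng X v0).mpr ⟨hv01, hv0X⟩) with h | h
    · exact hv0n h
    · exact absurd h (List.not_mem_nil)
  | cons item rest ih =>
    intro t s r hsn hsb hr hr1 hcov
    have hnotFull : ¬ Full X s := by
      intro hf
      obtain ⟨v0, hv01, hv0X, hv0n⟩ := exists_missing X s hsn hsb (by omega)
      exact hv0n (hf v0 ((mem_Rng X v0).mpr ⟨hv01, hv0X⟩))
    rw [solGoB]
    by_cases hb : 1 ≤ item ∧ item ≤ X ∧ item ∉ s
    · rw [if_pos hb]
      have hsb' : ∀ v ∈ PySem.Set.add s item, 1 ≤ v ∧ v ≤ X := by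
        intro v hv
        rcases (PySem.Set.mem_add _ _ _).mp hv with h | rfl
        · exact hsb v h
        · exact ⟨hb.1, hb.2.1⟩
      have hlenadd : (PySem.Set.add s item).length = s.length + 1 :=
        length_add_not_mem s item hb.2.2
      by_cases hr0 : r - 1 = 0
      · rw [if_pos hr0]
        have hfull : Full X (PySem.Set.add s item) := by
          apply full_of_len X _ (PySem.Set.nodup_add _ _ hsn) hsb'
          rw [hlenadd]; push_cast; omega
        have h0 : 0 ∈ {k : Nat | Covers X s ((item :: rest).take (k + 1))} := by
          show Covers X s ((item :: rest).take 1)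
          intro v hv
          rcases (PySem.Set.mem_add _ _ _).mp (hfull v hv) with h | rfl
          · exact Or.inl h
          · right; simp [List.take_succ_cons]
        rw [Nat.sInf_eq_zero.mpr (Or.inl h0)]
        omega
      · rw [if_neg hr0]
        have hcov' : Covers X (PySem.Set.add s item) rest := (covers_cons X s item rest).mp hcov
        rw [ih (t + 1) _ _ (PySem.Set.nodup_add _ _ hsn) hsb'
          (by rw [hlenadd]; push_cast; omega) (by omega) hcov']
        have hshift : sInf {k : Nat | Covers X s ((item :: rest).take (k + 1))} =
            sInf {k : Nat | Covers X (PySem.Set.add s item) (rest.take (k + 1))} + 1 := by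
          apply sInf_succ_eq
          · intro hc
            obtain ⟨v0, hv01, hv0X, hv0n⟩ :=
              exists_missing X (PySem.Set.add s item) (PySem.Set.nodup_add _ _ hsn) hsb'
                (by rw [hlenadd]; push_cast; omega)
            have hv0r := hc v0 ((mem_Rng X v0).mpr ⟨hv01, hv0X⟩)
            rcases hv0r with h | h
            · exact hv0n ((PySem.Set.mem_add _ _ _).mpr (Or.inl h))
            · simp only [List.take_succ_cons, List.take_zero] at h
              simp at h
              exact hv0n ((PySem.Set.mem_add _ _ _).mpr (Or.inr h))
          · intro k
            rw [List.take_succ_cons, covers_cons]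
          · refine ⟨rest.length, ?_⟩
            show Covers X (PySem.Set.add s item) (rest.take (rest.length + 1))
            rw [List.take_of_length_le (by omega)]
            exact hcov'
        rw [hshift]
        push_cast
        ring
    · rw [if_neg hb]
      have hitem : 1 ≤ item → item ≤ X → item ∈ s := by
        intro h1 h2
        by_contra hn
        exact hb ⟨h1, h2, hn⟩
      have hcovr : Covers X s rest := by
        intro v hv
        rcases hcov v hv with h | h
        · exact Or.inl h
        · rcases List.mem_cons.mp h with rfl | h'
          · have hbv := (mem_Rng X v).mp hv
            exact Or.inl (hitem hbv.1 hbv.2)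
          · exact Or.inr h'
      rw [ih (t + 1) _ _ hsn hsb hr hr1 hcovr]
      have hshift : sInf {k : Nat | Covers X s ((item :: rest).take (k + 1))} =
          sInf {k : Nat | Covers X s (rest.take (k + 1))} + 1 := by
        apply sInf_succ_eq
        · intro hc
          apply hnotFull
          intro v hv
          rcases hc v hv with h | h
          · exact h
          · simp only [List.take_succ_cons, List.take_zero] at h
            simp at h
            subst h
            have hbv := (mem_Rng X v).mp hv
            exact hitem hbv.1 hbv.2
        · intro k
          rw [List.take_succ_cons]
          constructor
          · intro hc v hv
            rcases hc v hv with h | h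
            · exact Or.inl h
            · rcases List.mem_cons.mp h with rfl | h'
              · have hbv := (mem_Rng X v).mp hv
                exact Or.inl (hitem hbv.1 hbv.2)
              · exact Or.inr h'
          · intro hc v hv
            rcases hc v hv with h | h
            · exact Or.inl h
            · exact Or.inr (List.mem_cons_of_mem _ h)
        · refine ⟨rest.length, ?_⟩
          show Covers X s (rest.take (rest.length + 1))
          rw [List.take_of_length_le (by omega)]
          exact hcovr
      rw [hshift]
      push_cast
      ring

-- ----- B's first-occurrence dict, characterized -----

-- the backward foldl of B's loop, rewritten as a foldr over enumerate(A) (List.foldl_reverse)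
def fBd (X : Int) (L : List (Int × Int)) : PySem.Dict Int Int :=
  L.foldr (fun p d => if 1 ≤ p.2 ∧ p.2 ≤ X then d.insert p.2 p.1 else d) PySem.Dict.empty

lemma solution_alt_eq_fBd (X : Int) (A : List Int) :
    solution_alt X A =
      (if (PySem.Dict.size (fBd X (PySem.List.enumerate A)) : Int) = X then
        (PySem.List.max? (PySem.Dict.values (fBd X (PySem.List.enumerate A))) (fun y => y)).getD (-1)
      else -1) := by
  unfold solution_alt fBd
  rw [List.foldl_reverse]

lemma fBd_nodup_keys (X : Int) : ∀ (L : List (Int × Int)), (fBd X L).keys.Nodup := by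
  intro L
  induction L with
  | nil => exact PySem.Dict.nodup_keys_empty
  | cons p L ih =>
    show (if 1 ≤ p.2 ∧ p.2 ≤ X then (fBd X L).insert p.2 p.1 else fBd X L).keys.Nodup
    split
    · exact PySem.Dict.nodup_keys_insert _ _ _ ih
    · exact ih

-- get? of the first-occurrence dict: the first index of v in A, shifted by the enumerate start
lemma fBd_get (X : Int) : ∀ (A : List Int) (s v : Int),
    (fBd X (PySem.List.enumerate A s)).get? v =
      if 1 ≤ v ∧ v ≤ X then Option.map (fun k : Nat => s + (k : Int)) (PySem.List.index? A v)
      else none := by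
  intro A
  induction A with
  | nil =>
    intro s v
    simp [fBd, PySem.List.enumerate_nil, PySem.Dict.get?_empty, PySem.List.index?_eq_idxOf?]
  | cons a A ih =>
    intro s v
    rw [PySem.List.enumerate_cons]
    show ((if 1 ≤ a ∧ a ≤ X then (fBd X (PySem.List.enumerate A (s + 1))).insert a s
        else fBd X (PySem.List.enumerate A (s + 1))).get? v) = _
    by_cases hv : v = a
    · subst hv
      by_cases ha : 1 ≤ v ∧ v ≤ X
      · rw [if_pos ha, if_pos ha, PySem.Dict.get?_insert_self,
          PySem.List.index?_cons_self]
        simp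
      · rw [if_neg ha, if_neg ha, ih]
        rw [if_neg ha]
    · have hshift : Option.map (fun k : Nat => s + (k : Int)) (PySem.List.index? (a :: A) v) =
          Option.map (fun k : Nat => (s + 1) + (k : Int)) (PySem.List.index? A v) := by
        rw [PySem.List.index?_cons_of_ne _ (fun h => hv h.symm), Option.map_map]
        apply congrArg (fun f => Option.map f (PySem.List.index? A v))
        funext k
        simp only [Function.comp]
        push_cast
        ring
      by_cases ha : 1 ≤ a ∧ a ≤ X
      · rw [if_pos ha, PySem.Dict.get?_insert_of_ne _ _ hv, ih, hshift]
      · rw [if_neg ha, ih, hshift]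

-- membership in values = being some key's looked-up value (keys unique)
lemma mem_values_iff (d : PySem.Dict Int Int) (hnd : d.keys.Nodup) (i : Int) :
    i ∈ d.values ↔ ∃ k, d.get? k = some i := by
  show i ∈ d.items.map (·.2) ↔ _
  rw [List.mem_map]
  constructor
  · rintro ⟨p, hp, rfl⟩
    exact ⟨p.1, (PySem.Dict.get?_eq_some_iff_mem_items _ _ _ hnd).mpr (by simpa using hp)⟩
  · rintro ⟨k, hk⟩
    exact ⟨(k, i), PySem.Dict.mem_items_of_get?_eq_some _ hk, rfl⟩

lemma size_eq_keys_length (d : PySem.Dict Int Int) : d.size = d.keys.length := by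
  show d.items.length = (d.items.map (·.1)).length
  rw [List.length_map]

lemma values_length (d : PySem.Dict Int Int) : d.values.length = d.keys.length := by
  show (d.items.map (·.2)).length = (d.items.map (·.1)).length
  rw [List.length_map, List.length_map]

-- key membership of B's dict: exactly the in-range values occurring in A
lemma fBd_mem_keys (X : Int) (A : List Int) (v : Int) :
    v ∈ (fBd X (PySem.List.enumerate A)).keys ↔ (1 ≤ v ∧ v ≤ X ∧ v ∈ A) := by
  rw [← not_iff_not, ← PySem.Dict.get?_eq_none_iff_not_mem_keys, fBd_get]
  by_cases hv : 1 ≤ v ∧ v ≤ X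
  · rw [if_pos hv, Option.map_eq_none_iff, PySem.List.index?_eq_none_iff]
    constructor
    · intro h hm
      exact h hm.2.2
    · intro h hm
      exact h ⟨hv.1, hv.2, hm⟩
  · rw [if_neg hv]
    constructor
    · intro _ hm
      exact hv ⟨hm.1, hm.2.1⟩
    · intro _
      rfl

-- under full coverage the keys are a permutation of 1..X
lemma fBd_keys_perm (X : Int) (hX : 1 ≤ X) (A : List Int)
    (hcov : ∀ v ∈ Rng X, v ∈ A) :
    ((fBd X (PySem.List.enumerate A)).keys).Perm (Rng X) := by
  have hnd := fBd_nodup_keys X (PySem.List.enumerate A)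
  have hsub : (fBd X (PySem.List.enumerate A)).keys ⊆ Rng X := by
    intro v hv
    have := (fBd_mem_keys X A v).mp hv
    exact (mem_Rng X v).mpr ⟨this.1, this.2.1⟩
  have hsub2 : Rng X ⊆ (fBd X (PySem.List.enumerate A)).keys := by
    intro v hv
    have hb := (mem_Rng X v).mp hv
    exact (fBd_mem_keys X A v).mpr ⟨hb.1, hb.2, hcov v hv⟩
  have hsp := List.subperm_of_subset hnd hsub
  have hsp2 := List.subperm_of_subset (by rw [Rng]; exact PySem.List.nodup_pyRange_one _ _) hsub2
  exact hsp.perm_of_length_le hsp2.length_le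

-- B for X ≤ 0: nothing is inserted, so the answer is -1
lemma alt_nonpos (X : Int) (hX : X ≤ 0) (A : List Int) : solution_alt X A = -1 := by
  rw [solution_alt_eq_fBd]
  have hkeys : (fBd X (PySem.List.enumerate A)).keys = [] := by
    rw [List.eq_nil_iff_forall_not_mem]
    intro v hv
    have := (fBd_mem_keys X A v).mp hv
    omega
  have hsize : (fBd X (PySem.List.enumerate A)).size = 0 := by
    rw [size_eq_keys_length, hkeys]; rfl
  rw [hsize]
  by_cases h0 : (0 : Int) = X
  · rw [if_pos (by exact_mod_cast h0)]
    have hvals : (fBd X (PySem.List.enumerate A)).values = [] := by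
      have := values_length (fBd X (PySem.List.enumerate A))
      rw [hkeys] at this
      exact List.eq_nil_of_length_eq_zero this
    rw [hvals]
    rw [(PySem.List.max?_eq_none_iff _ _).mpr rfl]
    rfl
  · rw [if_neg (by exact_mod_cast h0)]

-- B when some position 1..X never occurs: len(first) < X, so the answer is -1
lemma alt_uncovered (X : Int) (hX : 1 ≤ X) (A : List Int)
    (hnc : ¬ ∀ v ∈ Rng X, v ∈ A) : solution_alt X A = -1 := by
  rw [solution_alt_eq_fBd]
  push_neg at hnc
  obtain ⟨v0, hv0r, hv0n⟩ := hnc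
  rw [if_neg]
  intro hsz
  apply hv0n
  have hnd := fBd_nodup_keys X (PySem.List.enumerate A)
  have hsub : (fBd X (PySem.List.enumerate A)).keys ⊆ Rng X := by
    intro v hv
    have := (fBd_mem_keys X A v).mp hv
    exact (mem_Rng X v).mpr ⟨this.1, this.2.1⟩
  have hsp := List.subperm_of_subset hnd hsub
  have hlenR : ((Rng X).length : Int) = X := by
    simp only [Rng, PySem.List.length_pyRange_one]; omega
  have hlenK : ((fBd X (PySem.List.enumerate A)).keys.length : Int) = X := by
    rw [← size_eq_keys_length]; exact hsz
  have hperm := hsp.perm_of_length_le (by omega)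
  have := (fBd_mem_keys X A v0).mp (hperm.mem_iff.mpr hv0r)
  exact this.2.2

-- B under full coverage: max of the first-occurrence indices = first full-coverage index
lemma alt_covered (X : Int) (hX : 1 ≤ X) (A : List Int)
    (hcov : ∀ v ∈ Rng X, v ∈ A) :
    solution_alt X A = ((sInf {k : Nat | ∀ v ∈ Rng X, v ∈ A.take (k + 1)} : Nat) : Int) := by
  rw [solution_alt_eq_fBd]
  set d := fBd X (PySem.List.enumerate A) with hd
  have hnd : d.keys.Nodup := fBd_nodup_keys X _
  have hperm := fBd_keys_perm X hX A hcov
  have hlenR : ((Rng X).length : Int) = X := by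
    simp only [Rng, PySem.List.length_pyRange_one]; omega
  have hsz : (d.size : Int) = X := by
    rw [size_eq_keys_length, hperm.length_eq]; exact hlenR
  rw [if_pos hsz]
  -- the dict lookup of each 1..X position is its first occurrence index
  have hget : ∀ v, 1 ≤ v → v ≤ X → ∃ k : Nat, PySem.List.index? A v = some k ∧
      d.get? v = some (k : Int) := by
    intro v h1 h2
    have hvA : v ∈ A := hcov v ((mem_Rng X v).mpr ⟨h1, h2⟩)
    obtain ⟨k, hk⟩ := Option.isSome_iff_exists.mp ((PySem.List.index?_isSome_iff _ _).mpr hvA)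
    refine ⟨k, hk, ?_⟩
    rw [hd, fBd_get, if_pos ⟨h1, h2⟩, hk]
    simp
  -- values nonempty, so max(...) is some M
  have h1key : (1 : Int) ∈ d.keys := hperm.mem_iff.mpr ((mem_Rng X 1).mpr ⟨le_refl _, hX⟩)
  have hvne : d.values ≠ [] := by
    intro h
    have hlv := values_length d
    rw [h] at hlv
    have hk0 : d.keys = [] := List.eq_nil_of_length_eq_zero (by simpa using hlv.symm)
    rw [hk0] at h1key
    exact absurd h1key (List.not_mem_nil)
  obtain ⟨M, hM⟩ : ∃ M, PySem.List.max? d.values (fun y => y) = some M := by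
    rcases h : PySem.List.max? d.values (fun y => y) with _ | M
    · exact absurd ((PySem.List.max?_eq_none_iff _ _).mp h) hvne
    · exact ⟨M, rfl⟩
  rw [hM]
  have hMmem := PySem.List.max?_mem hM
  have hMmax : ∀ y ∈ d.values, y ≤ M := by
    intro y hy
    exact PySem.List.max?_isMax hM y hy
  -- M is the first-occurrence index of some position v*
  obtain ⟨vs, hvs⟩ := (mem_values_iff d hnd M).mp hMmem
  have hvsr : 1 ≤ vs ∧ vs ≤ X := by
    by_contra hvc
    rw [hd, fBd_get, if_neg hvc] at hvs
    simp at hvs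
  obtain ⟨kM, hkM, hkMget⟩ := hget vs hvsr.1 hvsr.2
  have hMk : M = (kM : Int) := by
    rw [hkMget] at hvs
    exact (Option.some_inj.mp hvs).symm
  obtain ⟨hkMlen, hkMel, hkMfirst⟩ := PySem.List.getElem_of_index?_eq_some hkM
  -- kM is in the coverage set
  have hkMS : kM ∈ {k : Nat | ∀ v ∈ Rng X, v ∈ A.take (k + 1)} := by
    intro v hv
    have hb := (mem_Rng X v).mp hv
    obtain ⟨kv, hkv, hkvget⟩ := hget v hb.1 hb.2
    have hkvval : ((kv : Int)) ∈ d.values := (mem_values_iff d hnd _).mpr ⟨v, hkvget⟩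
    have hkvle : (kv : Int) ≤ M := hMmax _ hkvval
    obtain ⟨hkvlen, hkvel, _⟩ := PySem.List.getElem_of_index?_eq_some hkv
    rw [← hkvel]
    exact mem_take_of_getElem A kv (kM + 1) hkvlen (by omega)
  -- kM is minimal in it
  have hkMmin : ∀ k ∈ {k : Nat | ∀ v ∈ Rng X, v ∈ A.take (k + 1)}, kM ≤ k := by
    intro k hk
    have hvst : vs ∈ A.take (k + 1) := hk vs ((mem_Rng X vs).mpr hvsr)
    obtain ⟨j, hjk, hjlen, hjel⟩ := exists_of_mem_take A (k + 1) vs hvst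
    have : kM ≤ j := by
      by_contra hlt
      exact hkMfirst j (by omega) hjel
    omega
  have hsInf : sInf {k : Nat | ∀ v ∈ Rng X, v ∈ A.take (k + 1)} = kM := by
    apply le_antisymm (Nat.sInf_le hkMS)
    exact hkMmin _ (Nat.sInf_mem ⟨kM, hkMS⟩)
  rw [hsInf, hMk]
  rfl

-- the bridge: the ghost loop computes exactly B's answer
lemma bridge (X : Int) (A : List Int) :
    solGoB X 0 PySem.Set.empty X A = solution_alt X A := by
  by_cases hX : 1 ≤ X
  · by_cases hcov : ∀ v ∈ Rng X, v ∈ A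
    · rw [solGoB_min X hX A 0 PySem.Set.empty X List.nodup_nil
        (fun v hv => absurd hv (List.not_mem_nil)) (by simp [PySem.Set.empty]) hX
        ((covers_empty_iff X A).mpr hcov)]
      rw [alt_covered X hX A hcov]
      have hsets : {k : Nat | Covers X PySem.Set.empty (A.take (k + 1))} =
          {k : Nat | ∀ v ∈ Rng X, v ∈ A.take (k + 1)} := by
        ext k
        exact covers_empty_iff X _
      rw [hsets]
      ring
    · rw [solGoB_none X A 0 PySem.Set.empty X List.nodup_nil
        (fun v hv => absurd hv (List.not_mem_nil)) (by simp [PySem.Set.empty])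
        (fun hc => hcov ((covers_empty_iff X A).mp hc))]
      rw [alt_uncovered X hX A hcov]
  · rw [solGoB_nonpos X (by omega), alt_nonpos X (by omega)]

-- ----- tightness: inside D_solution, A returns -1 while B returns a nonnegative index -----

-- "a nonpositive value arrives before A's comparison can ever succeed", following A's loop structure
def PBC (X : Int) : List Int → PySem.Set Int → Prop
  | [], _ => False
  | item :: rest, path =>
    if item > X then PBC X rest path
    else item ≤ 0 ∨ (¬ Full X (PySem.Set.add path item) ∧ PBC X rest (PySem.Set.add path item))

lemma A_poisoned (X : Int) : ∀ (l : List Int) (sec : Int) (path : PySem.Set Int) (p : Int),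
    p ∈ path → p ≤ 0 → solGoA X (Rng X) sec path l = -1 := by
  intro l
  induction l with
  | nil => intro sec path p _ _; rfl
  | cons item rest ih =>
    intro sec path p hp hp0
    by_cases hgt : item > X
    · rw [solGoA, if_pos hgt]
      exact ih _ _ p hp hp0
    · have hne : ¬ (PySem.Set.equal (PySem.Set.add path item) (Rng X) = true) := by
        intro h
        have h' := (PySem.Set.equal_iff _ _).mp h p
        have := (mem_Rng X p).mp (h'.mp ((PySem.Set.mem_add _ _ _).mpr (Or.inl hp)))
        omega
      rw [solGoA, if_neg hgt, if_neg hne]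
      exact ih _ _ p ((PySem.Set.mem_add _ _ _).mpr (Or.inl hp)) hp0

lemma A_neg (X : Int) : ∀ (l : List Int) (sec : Int) (path : PySem.Set Int),
    PBC X l path → solGoA X (Rng X) sec path l = -1 := by
  intro l
  induction l with
  | nil => intro sec path h; rw [PBC] at h; exact h.elim
  | cons item rest ih =>
    intro sec path hpbc
    rw [PBC] at hpbc
    by_cases hgt : item > X
    · rw [if_pos hgt] at hpbc
      rw [solGoA, if_pos hgt]
      exact ih _ _ hpbc
    · rw [if_neg hgt] at hpbc
      rcases hpbc with h0 | ⟨hnf, hrec⟩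
      · have hne : ¬ (PySem.Set.equal (PySem.Set.add path item) (Rng X) = true) := by
          intro h
          have h' := (PySem.Set.equal_iff _ _).mp h item
          have := (mem_Rng X item).mp (h'.mp ((PySem.Set.mem_add _ _ _).mpr (Or.inr rfl)))
          omega
        rw [solGoA, if_neg hgt, if_neg hne]
        exact A_poisoned X rest _ _ item ((PySem.Set.mem_add _ _ _).mpr (Or.inr rfl)) h0
      · have hne : ¬ (PySem.Set.equal (PySem.Set.add path item) (Rng X) = true) := by
          intro h
          apply hnf
          intro v hv
          exact ((PySem.Set.equal_iff _ _).mp h v).mpr hv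
        rw [solGoA, if_neg hgt, if_neg hne]
        exact ih _ _ hrec

lemma pbc_intro (X : Int) (hX : 1 ≤ X) : ∀ (l : List Int) (path : PySem.Set Int) (i : Nat),
    i < l.length → l.getD i 0 ≤ 0 →
    (∀ j : Nat, j < i → ¬ l.getD j 0 ≤ 0) →
    (∀ j : Nat, j < i → ¬ Covers X path (l.take (j + 1))) →
    PBC X l path := by
  intro l
  induction l with
  | nil => intro path i hi _ _ _; simp at hi
  | cons item rest ih =>
    intro path i hi h0 hmin hcov
    rw [PBC]
    rcases i with _ | i'
    · have hit : item ≤ 0 := by simpa using h0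
      rw [if_neg (by omega)]
      exact Or.inl hit
    · have h1 : (1:Int) ≤ item := by
        have := hmin 0 (Nat.succ_pos _)
        simp only [List.getD_cons_zero] at this
        omega
      by_cases hgt : item > X
      · rw [if_pos hgt]
        apply ih path i' (by simpa using hi) (by simpa using h0)
        · intro j hj
          have := hmin (j + 1) (by omega)
          simpa using this
        · intro j hj hc
          apply hcov (j + 1) (by omega)
          intro v hv
          rcases hc v hv with h | h
          · exact Or.inl h
          · rw [List.take_succ_cons]
            exact Or.inr (List.mem_cons_of_mem _ h)
      · rw [if_neg hgt]
        right
        constructor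
        · intro hfull
          apply hcov 0 (Nat.succ_pos _)
          intro v hv
          rcases (PySem.Set.mem_add _ _ _).mp (hfull v hv) with h | rfl
          · exact Or.inl h
          · right
            simp [List.take_succ_cons]
        · apply ih (PySem.Set.add path item) i' (by simpa using hi) (by simpa using h0)
          · intro j hj
            have := hmin (j + 1) (by omega)
            simpa using this
          · intro j hj hc
            apply hcov (j + 1) (by omega)
            intro v hv
            rw [List.take_succ_cons]
            rcases hc v hv with h | h
            · rcases (PySem.Set.mem_add _ _ _).mp h with h' | rfl
              · exact Or.inl h'
              · exact Or.inr List.mem_cons_self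
            · exact Or.inr (List.mem_cons_of_mem _ h)

-- ===== VERDICT (by name: the statement is the Claim_ definition above) =====
theorem solution_spec : Claim_unchanged_solution := by
  intro X A _hDom
  unfold Spec_solution
  intro hD
  show solution X A = solution_alt X A
  rw [← bridge X A]
  unfold solution
  by_cases hX : 1 ≤ X
  · show solGoA X (Rng X) 0 PySem.Set.empty A = solGoB X 0 PySem.Set.empty X A
    apply mainEq X hX A 0 PySem.Set.empty PySem.Set.empty X
    · exact List.nodup_nil
    · exact List.nodup_nil
    · intro v hv; exact absurd hv (List.not_mem_nil)
    · intro v hv; exact absurd hv (List.not_mem_nil)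
    · intro v _ _
      constructor
      · intro hv; exact absurd hv (List.not_mem_nil)
      · intro hv; exact absurd hv (List.not_mem_nil)
    · simp [PySem.Set.empty]
    · exact hX
    · by_cases hc : Covers X PySem.Set.empty A
      · refine Or.inl ⟨fun v hv => absurd hv (List.not_mem_nil), cpf_intro X A _ ?_⟩
        intro k hk hkcov hkmin x hx
        by_contra hx1
        apply hD
        have hcover : ∀ v ∈ Rng X, v ∈ A.take (k + 1) := by
          intro v hv
          rcases hkcov v hv with h | h
          · exact absurd h (List.not_mem_nil)
          · exact h
        refine ⟨hX, k, List.mem_range.mpr hk, (cnt_iff_cover X hX _).mpr hcover, ?_,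
          ⟨x, hx, by omega⟩⟩
        intro t' ht' hcv
        exact hkmin t' (List.mem_range.mp ht')
          (fun v hv => Or.inr ((cnt_iff_cover X hX _).mp hcv v hv))
      · exact Or.inr hc
  · have hX0 : X ≤ 0 := by omega
    have hR0 : PySem.List.pyRange 1 (X + 1) 1 = [] := by
      rw [PySem.List.pyRange_one]
      have h : (X + 1 - 1).toNat = 0 := by omega
      rw [h]
      simp
    rw [hR0, show ([] : List Int) = PySem.Set.empty from rfl, solGoA_empty, solGoB_nonpos X hX0]

theorem solution_changed : Claim_changed_solution := by
  unfold Claim_changed_solution; decide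

theorem solution_tight : Claim_exact_solution := by
  intro X A _hDom hD
  obtain ⟨hX, t0, ht0mem, hcnt, hminc, hpois⟩ := hD
  obtain ⟨x, hxmem, hx0⟩ := hpois
  have ht0 : t0 < A.length := List.mem_range.mp ht0mem
  have hcov : ∀ v ∈ Rng X, v ∈ A.take (t0 + 1) := (cnt_iff_cover X hX _).mp hcnt
  obtain ⟨j, hj, hjx⟩ := List.mem_iff_getElem.mp hxmem
  have hjlen : j < A.length ∧ j < t0 + 1 := by
    simp only [List.length_take] at hj
    omega
  have hgd : A.getD j 0 ≤ 0 := by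
    rw [List.getD_eq_getElem A 0 hjlen.1]
    rw [List.getElem_take] at hjx
    omega
  obtain ⟨i0, hQ, hmin⟩ :=
    exists_minimal (P := fun i => i < A.length ∧ A.getD i 0 ≤ 0) ⟨j, hjlen.1, hgd⟩
  have hi0j : i0 ≤ j := by
    by_contra hlt
    exact hmin j (by omega) ⟨hjlen.1, hgd⟩
  have hA1 : solution X A = -1 := by
    apply A_neg X A 0 PySem.Set.empty
    apply pbc_intro X hX A PySem.Set.empty i0 hQ.1 hQ.2
    · intro j' hj' hle
      exact hmin j' hj' ⟨by omega, hle⟩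
    · intro j' hj' hc
      apply hminc j' (List.mem_range.mpr (by omega))
      apply (cnt_iff_cover X hX _).mpr
      intro v hv
      rcases hc v hv with h | h
      · exact absurd h (List.not_mem_nil)
      · exact h
  have hcovA : ∀ v ∈ Rng X, v ∈ A := by
    intro v hv
    exact List.take_subset _ _ (hcov v hv)
  have hB : solution_alt X A = ((sInf {k : Nat | ∀ v ∈ Rng X, v ∈ A.take (k + 1)} : Nat) : Int) :=
    alt_covered X hX A hcovA
  rw [hA1, hB]
  omega
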